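-- pv_equiv track=rewrite | github.com/itcharge/LeetCode-Py | Templates/06.String/String-BM.py | generageSuffixArray
-- ===== SOURCE A (Python) =====
-- def generageSuffixArray(p: str):
--     m = len(p)
--     suffix = [m for _ in range(m)]                  # 初始化时假设匹配的最大长度为 m
--     for i in range(m - 2, -1, -1):                  # 子串末尾从 m - 2 开始
--         start = i                                   # start 为子串开始位置
--         while start >= 0 and p[start] == p[m - 1 - i + start]:
--             start -= 1                              # 进行后缀匹配，start 为匹配到的子串开始位置
--         suffix[i] = i - start                       # 更新以下标 i 为结尾的子串与模式串后缀匹配的最大长度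
--     return suffix
-- ===== SOURCE B (Python) =====
-- def generageSuffixArray(p: str):
--     # Z-algorithm on the reversed pattern: z[j] = lcp(r, r[j:]) computed in O(m)
--     # by maintaining the rightmost match box [l, r); suffix array is z reversed.
--     m = len(p)
--     r = p[::-1]
--     z = [0] * m
--     if m:
--         z[0] = m
--     l = rt = 0
--     for j in range(1, m):
--         k = 0
--         if j < rt:
--             k = min(z[j - l], rt - j)
--         while j + k < m and r[k] == r[j + k]:
--             k += 1
--         z[j] = k
--         if j + k > rt:
--             l, rt = j, j + k
--     return z[::-1]
-- ===== Notes on version B (the rewrite author's own statement) =====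
-- stated objective: faster
-- what changed: A matches each suffix character-by-character with a fresh backward while-loop per position (quadratic); B runs the Z-algorithm on the reversed pattern, reusing previously computed match lengths via the rightmost match box so each character is compared O(1) times amortised, and reverses the z-array.
import Mathlib
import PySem

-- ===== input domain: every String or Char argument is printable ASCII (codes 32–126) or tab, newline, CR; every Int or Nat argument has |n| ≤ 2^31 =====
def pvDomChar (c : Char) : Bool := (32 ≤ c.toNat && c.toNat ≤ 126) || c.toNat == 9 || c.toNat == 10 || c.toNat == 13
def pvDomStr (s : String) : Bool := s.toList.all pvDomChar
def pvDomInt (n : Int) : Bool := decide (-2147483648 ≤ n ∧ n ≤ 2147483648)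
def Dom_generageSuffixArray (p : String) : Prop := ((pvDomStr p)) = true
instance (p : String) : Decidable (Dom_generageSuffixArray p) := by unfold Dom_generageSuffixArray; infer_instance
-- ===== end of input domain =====

-- B replaces A's per-position quadratic backward matching by the linear Z-algorithm on the
-- reversed pattern (objective: faster, asymptotic O(m) vs O(m^2)).


-- ===== PORT A =====
-- A's inner `while start >= 0 and p[start] == p[m - 1 - i + start]: start -= 1`,
-- indexing via pyGet? (both options are `some` whenever the loop runs within A's bounds).
def pvWhileA (c : List Char) (m i start : Int) : Int :=
  if h : 0 ≤ start ∧ PySem.List.pyGet? c start = PySem.List.pyGet? c (m - 1 - i + start) then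
    pvWhileA c m i (start - 1)
  else start
termination_by (start + 1).toNat
decreasing_by obtain ⟨h1, -⟩ := h; omega

-- `suffix[i] = i - start` is ported as List.set i.toNat (exact: every i produced by
-- range(m-2, -1, -1) lies in [0, m-2], so the assignment is in range and i.toNat = i).
def generageSuffixArray (p : String) : List Int :=
  let c := p.toList
  let m : Int := c.length
  let suffix : List Int := List.replicate c.length m
  (PySem.List.pyRange (m - 2) (-1) (-1)).foldl
    (fun suf i => suf.set i.toNat (i - pvWhileA c m i i)) suffix

-- ===== PORT B =====
-- Source B's `while j + k < m and r[k] == r[j + k]: k += 1` (indexing via pyGet?; both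
-- options are `some` whenever the loop runs, since 0 ≤ k ≤ j + k < m).
def pvZExt (r : List Char) (m j k : Int) : Int :=
  if h : j + k < m ∧ PySem.List.pyGet? r k = PySem.List.pyGet? r (j + k) then
    pvZExt r m j (k + 1)
  else k
termination_by (m - (j + k)).toNat
decreasing_by obtain ⟨h1, -⟩ := h; omega

-- Source B's in-range read `z[j - l]` (exact there: 0 ≤ j - l < len(z) whenever it is evaluated,
-- so the `.getD 0` default is never taken).
def pvIdx (z : List Int) (i : Int) : Int := (PySem.List.pyGet? z i).getD 0

def generageSuffixArray_alt (p : String) : List Int :=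
  let r := p.toList.reverse
  let m : Int := r.length
  let z0 : List Int := List.replicate r.length 0
  let z1 := if r.length ≠ 0 then z0.set 0 m else z0
  let res := (PySem.List.pyRange 1 m 1).foldl
    (fun (st : List Int × Int × Int) j =>
      let k0 : Int := if j < st.2.2 then min (pvIdx st.1 (j - st.2.1)) (st.2.2 - j) else 0
      let k := pvZExt r m j k0
      let z' := st.1.set j.toNat k
      if j + k > st.2.2 then (z', j, j + k) else (z', st.2.1, st.2.2))
    (z1, 0, 0)
  res.1.reverse

-- ===== PRECONDITION & SPEC =====
def Spec_generageSuffixArray (p : String) (out : List Int) : Prop := out = generageSuffixArray_alt p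
instance (p : String) (out : List Int) : Decidable (Spec_generageSuffixArray p out) := by unfold Spec_generageSuffixArray; infer_instance

-- ===== CLAIM (what is proved, stated in full; the proofs are below) =====
def Claim_equal_generageSuffixArray : Prop := ∀ (p : String), Dom_generageSuffixArray p → Spec_generageSuffixArray p (generageSuffixArray p)

-- ===== LEMMAS AND PROOFS =====

-- length of the longest common prefix, the common specification both ports are reduced to
def pvLcp : List Char → List Char → Int
  | x :: xs, y :: ys => if x = y then 1 + pvLcp xs ys else 0
  | _, _ => 0

-- the common middle form: A's result and B's result both equal this naive description
def pvNaive (p : String) : List Int :=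
  let r := p.toList.reverse
  ((List.range r.length).map (fun j => pvLcp r (r.drop j))).reverse

theorem pvLcp_nil (ys : List Char) : pvLcp [] ys = 0 := by cases ys <;> rfl

theorem pvLcp_nonneg (xs ys : List Char) : 0 ≤ pvLcp xs ys := by
  induction xs generalizing ys with
  | nil => cases ys <;> simp [pvLcp]
  | cons x xs ih =>
    cases ys with
    | nil => simp [pvLcp]
    | cons y ys =>
      simp only [pvLcp]; split_ifs with h
      · have := ih ys; omega
      · omega

theorem pvLcp_comm (xs ys : List Char) : pvLcp xs ys = pvLcp ys xs := by
  induction xs generalizing ys with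
  | nil => cases ys <;> rfl
  | cons x xs ih =>
    cases ys with
    | nil => rfl
    | cons y ys =>
      simp only [pvLcp]
      by_cases h : x = y
      · subst h; simp [ih]
      · rw [if_neg h, if_neg (fun hh : y = x => h hh.symm)]

theorem pvLcp_self (xs : List Char) : pvLcp xs xs = xs.length := by
  induction xs with
  | nil => rfl
  | cons x xs ih => simp [pvLcp, ih]; omega

theorem pvLcp_le_left (xs ys : List Char) : pvLcp xs ys ≤ xs.length := by
  induction xs generalizing ys with
  | nil => cases ys <;> simp [pvLcp]
  | cons x xs ih =>
    cases ys with
    | nil =>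
      rw [show pvLcp (x :: xs) [] = 0 from rfl]
      positivity
    | cons y ys =>
      simp only [pvLcp]; split_ifs with h
      · have := ih ys; simp; omega
      · simp; omega

theorem pvLcp_le_right (xs ys : List Char) : pvLcp xs ys ≤ ys.length := by
  rw [pvLcp_comm]; exact pvLcp_le_left ys xs

-- positions strictly below the lcp agree (and are in range)
theorem pvLcp_agree_lt (xs ys : List Char) (k : Nat) (h : (k : Int) < pvLcp xs ys) :
    xs[k]? = ys[k]? ∧ k < xs.length := by
  induction xs generalizing ys k with
  | nil => rw [pvLcp_nil] at h; omega
  | cons x xs ih =>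
    cases ys with
    | nil => simp [pvLcp] at h; omega
    | cons y ys =>
      simp only [pvLcp] at h
      split_ifs at h with hxy
      · cases k with
        | zero => subst hxy; simp
        | succ k =>
          have hk : (k : Int) < pvLcp xs ys := by push_cast at h ⊢; omega
          obtain ⟨h1, h2⟩ := ih ys k hk
          exact ⟨by simpa using h1, by simpa using h2⟩
      · omega

-- prefixes up to the lcp agree
theorem pvLcp_take_agree (xs ys : List Char) (k : Nat) (h : (k : Int) ≤ pvLcp xs ys) :
    xs.take k = ys.take k := by
  apply List.ext_getElem?
  intro j
  by_cases hj : j < k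
  · have := pvLcp_agree_lt xs ys j (by omega)
    rw [List.getElem?_take_of_lt hj, List.getElem?_take_of_lt hj, this.1]
  · rw [List.getElem?_take_eq_none (by omega), List.getElem?_take_eq_none (by omega)]

-- agreement of prefixes bounds the lcp from below
theorem pvLcp_ge_of_take (xs ys : List Char) (k : Nat)
    (h : xs.take k = ys.take k) (hk : k ≤ xs.length) : (k : Int) ≤ pvLcp xs ys := by
  induction k generalizing xs ys with
  | zero => push_cast; exact pvLcp_nonneg xs ys
  | succ k ih =>
    cases xs with
    | nil => simp at hk
    | cons x xs =>
      cases ys with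
      | nil => simp at h
      | cons y ys =>
        simp only [List.take_succ_cons, List.cons.injEq] at h
        have hk' : k ≤ xs.length := by simp at hk; omega
        have := ih xs ys h.2 hk'
        simp only [pvLcp, if_pos h.1]
        push_cast; omega

-- a mismatch right at position k pins the lcp to k
theorem pvLcp_eq_of_mismatch (xs ys : List Char) (k : Nat)
    (h : xs.take k = ys.take k) (hk1 : k < xs.length) (_hk2 : k < ys.length)
    (hne : xs[k]? ≠ ys[k]?) : pvLcp xs ys = k := by
  have hge := pvLcp_ge_of_take xs ys k h (by omega)
  by_contra hne2
  have hlt : (k : Int) < pvLcp xs ys := by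
    rcases lt_or_eq_of_le hge with h' | h'
    · exact h'
    · exact absurd h'.symm hne2
  exact hne (pvLcp_agree_lt xs ys k hlt).1

-- ---------- A-side: A's fold equals pvNaive ----------

theorem rev_take_succ (c : List Char) (n : Nat) (h : n < c.length) :
    (c.take (n + 1)).reverse = c.get ⟨n, h⟩ :: (c.take n).reverse := by
  rw [List.take_add_one]
  simp [List.getElem?_eq_getElem h]

theorem pvWhileA_eq (c : List Char) (i : Nat) (hi : i + 2 ≤ c.length) :
    ∀ n : Nat, n ≤ i + 1 →
      pvWhileA c c.length i ((n : Int) - 1) =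
        ((n : Int) - 1) - pvLcp ((c.take n).reverse)
                                ((c.take ((c.length - 1 - i) + n)).reverse) := by
  intro n
  induction n with
  | zero =>
    intro _
    rw [pvWhileA]
    rw [dif_neg (by rintro ⟨h1, -⟩; omega)]
    simp [pvLcp_nil]
  | succ n ih =>
    intro hn
    have hn' : n ≤ i := by omega
    have hnm : n < c.length := by omega
    have hd : (c.length - 1 - i) + n < c.length := by omega
    have hidx : ((c.length : Int) - 1 - i + (((n : Int) + 1) - 1)) = (((c.length - 1 - i) + n : Nat) : Int) := by
      push_cast; omega
    have hget1 : PySem.List.pyGet? c (((n : Int) + 1) - 1) = some (c.get ⟨n, hnm⟩) := by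
      have h0 : ((n : Int) + 1 - 1) = ((n : Nat) : Int) := by omega
      rw [h0, PySem.List.pyGet?_natCast, List.getElem?_eq_getElem hnm]
      simp [List.get_eq_getElem]
    have hget2 : PySem.List.pyGet? c ((c.length : Int) - 1 - i + (((n : Int) + 1) - 1)) = some (c.get ⟨(c.length - 1 - i) + n, hd⟩) := by
      rw [hidx, PySem.List.pyGet?_natCast, List.getElem?_eq_getElem hd]
      simp [List.get_eq_getElem]
    rw [pvWhileA]
    push_cast
    rw [rev_take_succ c n hnm]
    have htk : (c.length - 1 - i) + (n + 1) = ((c.length - 1 - i) + n) + 1 := by omega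
    rw [htk, rev_take_succ c _ hd]
    push_cast at hget1 hget2 hidx
    by_cases hc : c.get ⟨n, hnm⟩ = c.get ⟨(c.length - 1 - i) + n, hd⟩
    · rw [dif_pos ⟨by omega, by rw [hget1, hget2, hc]⟩]
      have heq : ((n : Int) + 1) - 1 - 1 = ((n : Int)) - 1 := by omega
      rw [heq, ih (by omega)]
      simp only [pvLcp, if_pos hc]
      omega
    · rw [dif_neg (by
        rintro ⟨-, h2⟩
        rw [hget1, hget2] at h2
        exact hc (Option.some.inj h2))]
      simp only [pvLcp, if_neg hc]
      omega

-- the fold of in-range set-updates, read back pointwise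
theorem foldl_set_getElem? (v : Int → Int) :
    ∀ (is : List Int) (L : List Int), (∀ i ∈ is, 0 ≤ i) → ∀ j : Nat,
      (is.foldl (fun acc i => acc.set i.toNat (v i)) L)[j]? =
        if (j : Int) ∈ is then (if j < L.length then some (v j) else none) else L[j]? := by
  intro is
  induction is with
  | nil => intro L _ j; simp
  | cons i is ih =>
    intro L hnn j
    have hi0 : 0 ≤ i := hnn i (by simp)
    simp only [List.foldl_cons]
    rw [ih _ (fun x hx => hnn x (by simp [hx])) j, List.length_set]
    by_cases hmem : (j : Int) ∈ is
    · rw [if_pos hmem, if_pos (List.mem_cons_of_mem _ hmem)]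
    · rw [if_neg hmem]
      by_cases hij : i = (j : Int)
      · have hnat : i.toNat = j := by omega
        rw [if_pos (by simp [hij.symm]), List.getElem?_set, if_pos hnat, hnat, hij]
      · rw [if_neg (by simp only [List.mem_cons, not_or]; exact ⟨fun h => hij h.symm, hmem⟩)]
        rw [List.getElem?_set, if_neg (show ¬ i.toNat = j by omega)]

theorem portA_eq_naive (p : String) : generageSuffixArray p = pvNaive p := by
  unfold generageSuffixArray pvNaive
  simp only []
  set c := p.toList with hc
  apply List.ext_getElem?
  intro j
  have hnn : ∀ i ∈ PySem.List.pyRange ((c.length : Int) - 2) (-1) (-1), 0 ≤ i := by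
    intro i hmem
    rw [PySem.List.mem_pyRange_neg_one] at hmem
    omega
  rw [foldl_set_getElem? _ _ _ hnn j]
  simp only [PySem.List.mem_pyRange_neg_one, List.length_replicate, List.length_reverse]
  by_cases hjm : j < c.length
  · rw [List.getElem?_reverse (by simpa using hjm)]
    simp only [List.length_map, List.length_range]
    rw [List.getElem?_map, List.getElem?_range (by omega)]
    simp only [Option.map_some]
    by_cases hj2 : j + 2 ≤ c.length
    · rw [if_pos (by constructor <;> omega), if_pos hjm]
      have hw := pvWhileA_eq c j hj2 (j + 1) (by omega)
      have hs : (((j + 1 : Nat)) : Int) - 1 = (j : Int) := by push_cast; omega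
      rw [hs] at hw
      rw [hw]
      have htk : (c.length - 1 - j) + (j + 1) = c.length := by omega
      rw [htk, List.take_length]
      have hdrop : (c.take (j + 1)).reverse = c.reverse.drop (c.length - 1 - j) := by
        rw [List.reverse_take]
        congr 1
        omega
      rw [hdrop, pvLcp_comm]
      congr 2
      omega
    · rw [if_neg (by rintro ⟨-, h2⟩; omega)]
      rw [List.getElem?_replicate, if_pos hjm]
      have h0 : c.length - 1 - j = 0 := by omega
      rw [h0, List.drop_zero, pvLcp_self]
      simp
  · rw [if_neg (by rintro ⟨-, h2⟩; omega), List.getElem?_replicate, if_neg hjm]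
    rw [List.getElem?_eq_none (by simpa using hjm)]

-- ---------- B-side: B's fold equals pvNaive ----------

-- the match box maintained by the Z-algorithm: either untouched, or [l, rt) lies inside a
-- verified match of r with r shifted by l
def pvBoxInv (r : List Char) (j : Nat) (l rt : Int) : Prop :=
  (l = 0 ∧ rt = 0) ∨
  (1 ≤ l ∧ l < (j : Int) ∧ rt ≤ l + pvLcp r (r.drop l.toNat) ∧ rt ≤ (r.length : Int))

-- invariant of B's fold after processing indices 1..j-1
def pvZInv (r : List Char) (j : Nat) (st : List Int × Int × Int) : Prop :=
  st.1.length = r.length ∧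
  (∀ t : Nat, t < j → st.1[t]? = some (pvLcp r (r.drop t))) ∧
  pvBoxInv r j st.2.1 st.2.2

-- the extension loop, started within the true lcp, computes exactly the lcp
theorem pvZExt_eq (r : List Char) (jn : Nat) :
    ∀ (fuel kn : Nat), (pvLcp r (r.drop jn)).toNat - kn ≤ fuel →
      (kn : Int) ≤ pvLcp r (r.drop jn) →
      pvZExt r r.length jn kn = pvLcp r (r.drop jn) := by
  intro fuel
  induction fuel with
  | zero =>
    intro kn hf hk
    -- kn = lcp: the loop condition must fail
    have hkn : (kn : Int) = pvLcp r (r.drop jn) := by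
      have := pvLcp_nonneg r (r.drop jn); omega
    rw [pvZExt, dif_neg]
    · exact hkn
    rintro ⟨h1, h2⟩
    -- jn + kn < r.length and chars equal at kn would extend the lcp past itself
    have hkr : kn < r.length := by omega
    have hdl : kn < (r.drop jn).length := by simp; omega
    have hget1 : PySem.List.pyGet? r (kn : Int) = r[kn]? := by
      rw [PySem.List.pyGet?_natCast]
    have hcast : ((jn : Int) + kn) = (((jn + kn : Nat)) : Int) := by push_cast; ring_nf
    have hget2 : PySem.List.pyGet? r ((jn : Int) + (kn : Int)) = r[jn + kn]? := by
      rw [hcast, PySem.List.pyGet?_natCast]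
    rw [hget1, hget2] at h2
    have hagree : r.take (kn + 1) = (r.drop jn).take (kn + 1) := by
      apply List.ext_getElem?
      intro t
      by_cases ht : t < kn + 1
      · rw [List.getElem?_take_of_lt ht, List.getElem?_take_of_lt ht]
        by_cases htk : t < kn
        · exact (pvLcp_agree_lt r (r.drop jn) t (by push_cast; omega)).1
        · have : t = kn := by omega
          subst this
          rw [h2, List.getElem?_drop]
      · rw [List.getElem?_take_eq_none (by omega), List.getElem?_take_eq_none (by omega)]
    have := pvLcp_ge_of_take r (r.drop jn) (kn + 1) hagree (by omega)
    omega
  | succ fuel ih =>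
    intro kn hf hk
    by_cases hlt : (kn : Int) < pvLcp r (r.drop jn)
    · -- chars at kn agree: the loop steps
      obtain ⟨hag, hkr⟩ := pvLcp_agree_lt r (r.drop jn) kn hlt
      have hkd : kn < (r.drop jn).length := by
        have := pvLcp_le_right r (r.drop jn); omega
      have hjk : jn + kn < r.length := by simp at hkd; omega
      rw [pvZExt, dif_pos]
      · have hstep := ih (kn + 1) (by omega) (by push_cast; omega)
        have : (kn : Int) + 1 = ((kn + 1 : Nat) : Int) := by push_cast; ring
        rw [this, hstep]
      constructor
      · push_cast; omega
      · have hcast : ((jn : Int) + kn) = (((jn + kn : Nat)) : Int) := by push_cast; ring_nf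
        rw [PySem.List.pyGet?_natCast, hcast, PySem.List.pyGet?_natCast]
        rw [hag, List.getElem?_drop]
    · exact ih kn (by omega) hk

-- agreement inside the box transfers the shifted-by-l window to the shifted-by-j window
theorem pvBox_take_agree (r : List Char) (l j rt : Nat)
    (hlj : l ≤ j) (hjr : j ≤ rt) (_hrm : rt ≤ r.length)
    (hrt : (rt : Int) ≤ (l : Int) + pvLcp r (r.drop l)) :
    (r.drop j).take (rt - j) = (r.drop (j - l)).take (rt - j) := by
  have h1 : r.take (rt - l) = (r.drop l).take (rt - l) :=
    pvLcp_take_agree r (r.drop l) (rt - l) (by push_cast; omega)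
  have h2 := congrArg (List.drop (j - l)) h1
  rw [List.drop_take, List.drop_take, List.drop_drop] at h2
  have e1 : rt - l - (j - l) = rt - j := by omega
  have e2 : l + (j - l) = j := by omega
  rw [e1, e2] at h2
  exact h2.symm

-- one step of the fold preserves the invariant and records the true z-value
theorem pvZStep (r : List Char) (jn : Nat) (st : List Int × Int × Int)
    (hinv : pvZInv r jn st) (hj1 : 1 ≤ jn) (hjm : jn < r.length) :
    pvZInv r (jn + 1)
      (let j : Int := jn
       let k0 : Int := if j < st.2.2 then min (pvIdx st.1 (j - st.2.1)) (st.2.2 - j) else 0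
       let k := pvZExt r r.length j k0
       let z' := st.1.set j.toNat k
       if j + k > st.2.2 then (z', j, j + k) else (z', st.2.1, st.2.2)) := by
  obtain ⟨hlen, hz, hbox⟩ := hinv
  -- the computed k equals the true z-value at jn
  have hk : pvZExt r r.length (jn : Int)
      (if (jn : Int) < st.2.2 then min (pvIdx st.1 ((jn : Int) - st.2.1)) (st.2.2 - (jn : Int)) else 0) =
      pvLcp r (r.drop jn) := by
    by_cases hcase : (jn : Int) < st.2.2
    · rw [if_pos hcase]
      -- box is nontrivial
      rcases hbox with ⟨hl0, hr0⟩ | ⟨hl1, hlj, hrtl, hrtm⟩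
      · rw [hr0] at hcase; omega
      -- name the pieces
      set l := st.2.1 with hldef
      set rt := st.2.2 with hrdef
      have hl0 : 0 ≤ l := by omega
      set ln := l.toNat with hlndef
      set rtn := rt.toNat with hrtndef
      have hlcast : (ln : Int) = l := by omega
      have hrcast : (rtn : Int) = rt := by omega
      have hlnj : ln < jn := by omega
      have hjrt : jn < rtn := by omega
      have hrtm' : rtn ≤ r.length := by omega
      -- z[j - l] is the already-computed lcp at jn - ln
      have hidx : pvIdx st.1 ((jn : Int) - l) = pvLcp r (r.drop (jn - ln)) := by
        have hc : ((jn : Int) - l) = ((jn - ln : Nat) : Int) := by push_cast; omega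
        unfold pvIdx
        rw [hc, PySem.List.pyGet?_natCast, hz (jn - ln) (by omega)]
        rfl
      rw [hidx]
      set zl := pvLcp r (r.drop (jn - ln)) with hzldef
      have hzl0 : 0 ≤ zl := pvLcp_nonneg _ _
      have hagree := pvBox_take_agree r ln jn rtn (by omega) (by omega) hrtm'
        (by rw [hlcast, hrcast] at *; exact hrtl)
      by_cases hzcase : zl < rt - (jn : Int)
      · -- mismatch case: z[j] = zl exactly, no extension happens
        have hmin : min zl (rt - (jn : Int)) = zl := by omega
        rw [hmin]
        have hzlt : zl.toNat < rtn - jn := by omega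
        -- transfer agreement and the mismatch from shift (jn - ln) to shift jn
        have htake : r.take zl.toNat = (r.drop jn).take zl.toNat := by
          have h1 : r.take zl.toNat = (r.drop (jn - ln)).take zl.toNat :=
            pvLcp_take_agree r (r.drop (jn - ln)) zl.toNat (by omega)
          have h2 := congrArg (List.take zl.toNat) hagree
          rw [List.take_take, List.take_take, Nat.min_eq_left (by omega)] at h2
          rw [h1, ← h2]
        have hzlr : zl.toNat < r.length := by omega
        have hzld1 : zl.toNat < (r.drop (jn - ln)).length := by simp; omega
        have hzld2 : zl.toNat < (r.drop jn).length := by simp; omega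
        have hmm : r[zl.toNat]? ≠ (r.drop (jn - ln))[zl.toNat]? := by
          intro hcontra
          have hge := pvLcp_ge_of_take r (r.drop (jn - ln)) (zl.toNat + 1)
            (by
              apply List.ext_getElem?
              intro t
              by_cases ht : t < zl.toNat + 1
              · rw [List.getElem?_take_of_lt ht, List.getElem?_take_of_lt ht]
                by_cases htk : t < zl.toNat
                · exact (pvLcp_agree_lt r (r.drop (jn - ln)) t (by omega)).1
                · have : t = zl.toNat := by omega
                  subst this; exact hcontra
              · rw [List.getElem?_take_eq_none (by omega), List.getElem?_take_eq_none (by omega)])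
            (by omega)
          omega
        have htrans : (r.drop (jn - ln))[zl.toNat]? = (r.drop jn)[zl.toNat]? := by
          have h1 := congrArg (fun L => L[zl.toNat]?) hagree
          simp only at h1
          rw [List.getElem?_take_of_lt hzlt, List.getElem?_take_of_lt hzlt] at h1
          exact h1.symm
        have hlcpj : pvLcp r (r.drop jn) = zl.toNat :=
          pvLcp_eq_of_mismatch r (r.drop jn) zl.toNat htake hzlr hzld2
            (by rw [← htrans]; exact hmm)
        -- the extension loop immediately stops (fuel 0 argument)
        have := pvZExt_eq r jn 0 zl.toNat (by omega) (by omega)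
        rw [show ((zl.toNat : Nat) : Int) = zl by omega] at this
        exact this
      · -- box-limit case: start at rt - j, which is ≤ the true lcp, and extend
        have hmin : min zl (rt - (jn : Int)) = rt - (jn : Int) := by omega
        rw [hmin]
        have hk0 : (rt - (jn : Int)) = ((rtn - jn : Nat) : Int) := by omega
        have hge : ((rtn - jn : Nat) : Int) ≤ pvLcp r (r.drop jn) := by
          apply pvLcp_ge_of_take
          · have h1 : r.take (rtn - jn) = (r.drop (jn - ln)).take (rtn - jn) := by
              have := pvLcp_take_agree r (r.drop (jn - ln)) (rtn - jn) (by omega)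
              exact this
            rw [h1, ← hagree]
          · omega
        rw [hk0]
        exact pvZExt_eq r jn ((pvLcp r (r.drop jn)).toNat - (rtn - jn)) (rtn - jn) (by omega) hge
    · rw [if_neg hcase]
      exact pvZExt_eq r jn (pvLcp r (r.drop jn)).toNat 0 (by omega) (pvLcp_nonneg _ _)
  -- now rebuild the invariant
  simp only [hk]
  have hset : ∀ t : Nat, t < jn + 1 →
      (st.1.set (jn : Int).toNat (pvLcp r (r.drop jn)))[t]? = some (pvLcp r (r.drop t)) := by
    intro t ht
    rw [show ((jn : Int)).toNat = jn by omega]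
    by_cases htj : t = jn
    · subst htj
      rw [List.getElem?_set_self (by omega)]
    · rw [List.getElem?_set_ne (by omega), hz t (by omega)]
  have hlen' : (st.1.set (jn : Int).toNat (pvLcp r (r.drop jn))).length = r.length := by
    rw [List.length_set]; exact hlen
  have hlcpm : pvLcp r (r.drop jn) ≤ ((r.length : Int) - jn) := by
    have := pvLcp_le_right r (r.drop jn); simp at this; push_cast at this ⊢; omega
  have hjcast : ((jn : Int)).toNat = jn := by omega
  split_ifs with hupd
  · refine ⟨hlen', hset, Or.inr ?_⟩
    refine ⟨?_, ?_, ?_, ?_⟩ <;> dsimp only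
    · omega
    · push_cast; omega
    · rw [hjcast]
    · omega
  · refine ⟨hlen', hset, ?_⟩
    rcases hbox with ⟨h1, h2⟩ | ⟨h1, h2, h3, h4⟩
    · exact Or.inl ⟨h1, h2⟩
    · exact Or.inr ⟨h1, by dsimp only at *; omega, h3, h4⟩

-- folding B's step over range(1, j) establishes the invariant
theorem pvZFold (r : List Char) (z1 : List Int)
    (hlen : z1.length = r.length)
    (hz0 : ∀ t : Nat, t < 1 → z1[t]? = some (pvLcp r (r.drop t))) :
    ∀ jn : Nat, 1 ≤ jn → jn ≤ r.length →
      pvZInv r jn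
        ((PySem.List.pyRange 1 (jn : Int) 1).foldl
          (fun (st : List Int × Int × Int) j =>
            let k0 : Int := if j < st.2.2 then min (pvIdx st.1 (j - st.2.1)) (st.2.2 - j) else 0
            let k := pvZExt r (r.length : Int) j k0
            let z' := st.1.set j.toNat k
            if j + k > st.2.2 then (z', j, j + k) else (z', st.2.1, st.2.2))
          (z1, 0, 0)) := by
  intro jn
  induction jn with
  | zero => omega
  | succ n ih =>
    intro h1 hm
    by_cases hn : n = 0
    · subst hn
      rw [show ((1 : Nat) : Int) = 1 by rfl, PySem.List.pyRange_one_eq_nil (by omega)]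
      exact ⟨hlen, hz0, Or.inl ⟨rfl, rfl⟩⟩
    · have hsplit : PySem.List.pyRange 1 ((n + 1 : Nat) : Int) 1 =
          PySem.List.pyRange 1 (n : Int) 1 ++ [(n : Int)] := by
        have : ((n + 1 : Nat) : Int) = (n : Int) + 1 := by push_cast; ring
        rw [this, PySem.List.pyRange_one_succ_right (by omega)]
      rw [hsplit, List.foldl_append]
      simp only [List.foldl_cons, List.foldl_nil]
      exact pvZStep r n _ (ih (by omega) (by omega)) (by omega) (by omega)

-- reading the final state of the invariant back as the naive z-array
theorem pvZInv_out (r : List Char) (st : List Int × Int × Int)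
    (h : pvZInv r r.length st) :
    st.1 = (List.range r.length).map (fun j => pvLcp r (r.drop j)) := by
  obtain ⟨hlen, hz, -⟩ := h
  apply List.ext_getElem?
  intro t
  by_cases ht : t < r.length
  · rw [hz t ht, List.getElem?_map, List.getElem?_range ht]
    rfl
  · rw [List.getElem?_eq_none (by omega), List.getElem?_eq_none (by simp; omega)]

theorem portB_eq_naive (p : String) : generageSuffixArray_alt p = pvNaive p := by
  unfold generageSuffixArray_alt pvNaive
  simp only []
  set r := p.toList.reverse with hr
  by_cases hm : r.length = 0
  · rw [hm]
    rw [List.eq_nil_of_length_eq_zero hm]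
    simp [PySem.List.pyRange_one_eq_nil]
  · have hm1 : 1 ≤ r.length := by omega
    have hz1len : ((List.replicate r.length (0 : Int)).set 0 (r.length : Int)).length = r.length := by
      simp
    have hz10 : ∀ t : Nat, t < 1 →
        ((List.replicate r.length (0 : Int)).set 0 (r.length : Int))[t]? = some (pvLcp r (r.drop t)) := by
      intro t ht
      have : t = 0 := by omega
      subst this
      rw [List.getElem?_set_self (by simpa using hm1), List.drop_zero, pvLcp_self]
    have hinv := pvZFold r _ hz1len hz10 r.length hm1 le_rfl
    rw [if_pos hm]
    exact congrArg List.reverse (pvZInv_out r _ hinv)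

-- ===== VERDICT (by name: the statement is the Claim_ definition above) =====
theorem generageSuffixArray_spec : Claim_equal_generageSuffixArray := by
  intro p _
  unfold Spec_generageSuffixArray
  rw [portA_eq_naive, portB_eq_naive]
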